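-- pv_equiv track=rewrite | github.com/iamsamiofficial/Codeforces | maths/90.D. GCD-sequence.py | check
-- ===== SOURCE A (Python) =====
-- import math
--
-- def check(i,l):
--     store = []
--     g = []
--     for j in range(len(l)):
--         if i!=j:
--             store.append(l[j])
--     for i in range(len(store)-1):
--         g.append(math.gcd(store[i],store[i+1]))
--     if g == sorted(g):
--         return True
--     else:
--         False
-- ===== SOURCE B (Python) =====
-- import math
--
-- def check(i, l):
--     # Single pass: compare each adjacent gcd against the previous one,
--     # returning early as soon as a decrease is found (A's falsy result is None).
--     prev_val = None
--     prev_gcd = None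
--     for j, x in enumerate(l):
--         if j == i:
--             continue
--         if prev_val is not None:
--             g = math.gcd(prev_val, x)
--             if prev_gcd is not None and g < prev_gcd:
--                 return None
--             prev_gcd = g
--         prev_val = x
--     return True
-- ===== Notes on version B (the rewrite author's own statement) =====
-- stated objective: faster
-- what changed: Instead of building the list of adjacent gcds and comparing it with its sorted copy, B makes a single pass that compares each adjacent gcd with the previous one and returns early at the first decrease.
import Mathlib
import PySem

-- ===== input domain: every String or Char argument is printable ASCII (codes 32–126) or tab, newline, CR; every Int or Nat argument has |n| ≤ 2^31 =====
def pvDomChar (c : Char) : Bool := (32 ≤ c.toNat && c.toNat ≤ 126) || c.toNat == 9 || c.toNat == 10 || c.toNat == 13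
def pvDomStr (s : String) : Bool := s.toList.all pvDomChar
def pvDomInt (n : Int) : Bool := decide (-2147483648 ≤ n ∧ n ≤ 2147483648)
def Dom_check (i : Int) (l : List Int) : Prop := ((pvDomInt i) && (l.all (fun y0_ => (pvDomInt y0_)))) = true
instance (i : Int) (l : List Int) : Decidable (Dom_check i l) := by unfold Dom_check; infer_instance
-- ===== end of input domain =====

-- B replaces A's build-gcd-list-then-sort-and-compare by a single early-exit pass
-- comparing each adjacent gcd with the previous one (objective: faster).

-- ===== PORT A =====
def check (i : Int) (l : List Int) : Option Bool :=
  -- store = [l[j] for j in range(len(l)) if i != j], as an appending fold (Python's loop)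
  let store : List Int :=
    (PySem.List.pyRange 0 (l.length : Int) 1).foldl
      (fun acc j => if i ≠ j then acc ++ [PySem.List.pyGetD l j 0] else acc) []
  -- g = [gcd(store[k], store[k+1]) for k in range(len(store)-1)]
  let g : List Int :=
    (PySem.List.pyRange 0 ((store.length : Int) - 1) 1).foldl
      (fun acc k =>
        acc ++ [(Int.gcd (PySem.List.pyGetD store k 0) (PySem.List.pyGetD store (k + 1) 0) : Int)]) []
  -- A returns True when g == sorted(g), otherwise falls off the end (None)
  if g = PySem.List.sorted g (fun x => x) false then some true else none

-- ===== PORT B =====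
-- B's loop: state = (previous kept element, previous adjacent gcd); early return on a decrease.
def checkAltLoop (i : Int) : List (Int × Int) → Option Int → Option Int → Option Bool
  | [], _, _ => some true
  | (j, x) :: rest, prevVal, prevGcd =>
    if j = i then checkAltLoop i rest prevVal prevGcd
    else
      match prevVal with
      | none => checkAltLoop i rest (some x) prevGcd
      | some pv =>
        let g : Int := (Int.gcd pv x : Int)
        match prevGcd with
        | some pg => if g < pg then none else checkAltLoop i rest (some x) (some g)
        | none => checkAltLoop i rest (some x) (some g)

def check_alt (i : Int) (l : List Int) : Option Bool :=
  checkAltLoop i (PySem.List.enumerate l 0) none none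

-- ===== PRECONDITION & SPEC =====
def Spec_check (i : Int) (l : List Int) (out : Option Bool) : Prop := out = check_alt i l
instance (i : Int) (l : List Int) (out : Option Bool) : Decidable (Spec_check i l out) := by unfold Spec_check; infer_instance

-- ===== CLAIM (what is proved, stated in full; the proofs are below) =====
def Claim_equal_check : Prop := ∀ (i : Int) (l : List Int), Dom_check i l → Spec_check i l (check i l)

-- ===== LEMMAS AND PROOFS =====

-- the list A calls `store`: elements of l whose index differs from i
def storFrom (i : Int) (s : Int) : List Int → List Int
  | [] => []
  | x :: r => if i = s then storFrom i (s + 1) r else x :: storFrom i (s + 1) r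

-- adjacent gcds of a list
def gcds : List Int → List Int
  | a :: b :: r => (Int.gcd a b : Int) :: gcds (b :: r)
  | _ => []

-- B's loop once the index filter has been discharged
def loop2 : List Int → Option Int → Option Int → Option Bool
  | [], _, _ => some true
  | x :: rest, prevVal, prevGcd =>
    match prevVal with
    | none => loop2 rest (some x) prevGcd
    | some pv =>
      let g : Int := (Int.gcd pv x : Int)
      match prevGcd with
      | some pg => if g < pg then none else loop2 rest (some x) (some g)
      | none => loop2 rest (some x) (some g)

lemma checkAltLoop_eq_loop2 (i : Int) (l : List Int) :
    ∀ (s : Int) (pv pg : Option Int),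
      checkAltLoop i (PySem.List.enumerate l s) pv pg = loop2 (storFrom i s l) pv pg := by
  induction l with
  | nil => intro s pv pg; simp [PySem.List.enumerate_nil, checkAltLoop, storFrom, loop2]
  | cons x r ih =>
    intro s pv pg
    rw [PySem.List.enumerate_cons]
    by_cases h : s = i
    · simp [checkAltLoop, storFrom, h, ih]
    · have h' : ¬ i = s := fun hh => h hh.symm
      cases pv with
      | none => simp [checkAltLoop, storFrom, h, h', loop2, ih]
      | some pv =>
        cases pg with
        | none => simp [checkAltLoop, storFrom, h, h', loop2, ih]
        | some pg =>
          by_cases hg : (Int.gcd pv x : Int) < pg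
          · simp [checkAltLoop, storFrom, h, h', loop2, hg]
          · simp [checkAltLoop, storFrom, h, h', loop2, hg, ih]

lemma loop2_some_some : ∀ (xs : List Int) (pv pg : Int),
    loop2 xs (some pv) (some pg)
      = if List.IsChain (· ≤ ·) (pg :: gcds (pv :: xs)) then some true else none := by
  intro xs
  induction xs with
  | nil => intro pv pg; simp [loop2, gcds]
  | cons x r ih =>
    intro pv pg
    have hiff : List.IsChain (· ≤ ·) (pg :: gcds (pv :: x :: r)) ↔
        pg ≤ (Int.gcd pv x : Int) ∧ List.IsChain (· ≤ ·) ((Int.gcd pv x : Int) :: gcds (x :: r)) := by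
      rw [show gcds (pv :: x :: r) = (Int.gcd pv x : Int) :: gcds (x :: r) from rfl]
      exact List.isChain_cons_cons
    show (if (Int.gcd pv x : Int) < pg then none
          else loop2 r (some x) (some (Int.gcd pv x : Int))) = _
    by_cases h : (Int.gcd pv x : Int) < pg
    · rw [if_pos h, if_neg (fun hc => absurd (hiff.mp hc).1 (not_le.mpr h))]
    · rw [if_neg h, ih x _]
      by_cases hc : List.IsChain (· ≤ ·) ((Int.gcd pv x : Int) :: gcds (x :: r))
      · rw [if_pos hc, if_pos (hiff.mpr ⟨not_lt.mp h, hc⟩)]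
      · rw [if_neg hc, if_neg (fun hh => hc (hiff.mp hh).2)]

lemma loop2_some_none (xs : List Int) (pv : Int) :
    loop2 xs (some pv) none
      = if List.IsChain (· ≤ ·) (gcds (pv :: xs)) then some true else none := by
  cases xs with
  | nil => simp [loop2, gcds]
  | cons x r =>
    show loop2 r (some x) (some (Int.gcd pv x : Int)) = _
    rw [loop2_some_some]
    rfl

lemma check_alt_eq (i : Int) (l : List Int) :
    check_alt i l
      = if List.IsChain (· ≤ ·) (gcds (storFrom i 0 l)) then some true else none := by
  unfold check_alt
  rw [checkAltLoop_eq_loop2 i l 0 none none]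
  cases hs : storFrom i 0 l with
  | nil => simp [loop2, gcds]
  | cons x r =>
    show loop2 r (some x) none = _
    exact loop2_some_none r x

lemma store_fold (i : Int) (l : List Int) :
    ∀ (t : List Int) (s : Nat), l.drop s = t → ∀ acc : List Int,
      (PySem.List.pyRange (s : Int) (l.length : Int) 1).foldl
          (fun acc j => if i ≠ j then acc ++ [PySem.List.pyGetD l j 0] else acc) acc
        = acc ++ storFrom i (s : Int) t := by
  intro t
  induction t with
  | nil =>
    intro s h acc
    have hs : l.length ≤ s := List.drop_eq_nil_iff.mp h
    rw [PySem.List.pyRange_one_eq_nil (by exact_mod_cast hs)]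
    simp [storFrom]
  | cons x r ih =>
    intro s h acc
    have hlt : s < l.length := by
      by_contra hc
      rw [List.drop_eq_nil_of_le (by omega)] at h
      simp at h
    have hx : l[s]? = some x := by
      have h0 := congrArg (fun t => t[0]?) h
      simpa [List.getElem?_drop] using h0
    have hr : l.drop (s + 1) = r := by
      have hh : (l.drop s).tail = r := by rw [h]; rfl
      rw [List.tail_drop] at hh; exact hh
    rw [PySem.List.pyRange_one_cons (by exact_mod_cast hlt)]
    rw [List.foldl_cons]
    have hget : PySem.List.pyGetD l (s : Int) 0 = x := by
      rw [PySem.List.pyGetD_natCast]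
      simp [List.getD_eq_getElem?_getD, hx]
    have hcast : (s : Int) + 1 = ((s + 1 : Nat) : Int) := by push_cast; ring
    by_cases hi : i = (s : Int)
    · rw [if_neg (by simpa using hi), hcast, ih (s + 1) hr acc]
      rw [show storFrom i (s : Int) (x :: r) = storFrom i ((s : Int) + 1) r from by
        simp [storFrom, hi]]
      rw [hcast]
    · rw [if_pos (by simpa using hi), hget, hcast, ih (s + 1) hr (acc ++ [x])]
      rw [show storFrom i (s : Int) (x :: r) = x :: storFrom i ((s : Int) + 1) r from by
        simp [storFrom, hi]]
      rw [hcast]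
      simp

lemma gcd_fold (st : List Int) :
    ∀ (t : List Int) (s : Nat), st.drop s = t → ∀ acc : List Int,
      (PySem.List.pyRange (s : Int) ((st.length : Int) - 1) 1).foldl
          (fun acc k =>
            acc ++ [(Int.gcd (PySem.List.pyGetD st k 0) (PySem.List.pyGetD st (k + 1) 0) : Int)]) acc
        = acc ++ gcds t := by
  intro t
  induction t with
  | nil =>
    intro s h acc
    have hs : st.length ≤ s := List.drop_eq_nil_iff.mp h
    rw [PySem.List.pyRange_one_eq_nil (by omega)]
    simp [gcds]
  | cons a t' ih =>
    intro s h acc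
    have hlt : s < st.length := by
      by_contra hc
      rw [List.drop_eq_nil_of_le (by omega)] at h
      simp at h
    have ha : st[s]? = some a := by
      have h0 := congrArg (fun t => t[0]?) h
      simpa [List.getElem?_drop] using h0
    have ht' : st.drop (s + 1) = t' := by
      have hh : (st.drop s).tail = t' := by rw [h]; rfl
      rw [List.tail_drop] at hh; exact hh
    cases t' with
    | nil =>
      have hs1 : st.length ≤ s + 1 := List.drop_eq_nil_iff.mp ht'
      rw [PySem.List.pyRange_one_eq_nil (by omega)]
      simp [gcds]
    | cons b r =>
      have hb : st[s + 1]? = some b := by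
        have h0 := congrArg (fun t => t[0]?) ht'
        simpa [List.getElem?_drop] using h0
      have hs1 : s + 1 < st.length := (List.getElem?_eq_some_iff.mp hb).1
      rw [PySem.List.pyRange_one_cons (by omega)]
      rw [List.foldl_cons]
      have hga : PySem.List.pyGetD st (s : Int) 0 = a := by
        rw [PySem.List.pyGetD_natCast]
        simp [List.getD_eq_getElem?_getD, ha]
      have hcast : (s : Int) + 1 = ((s + 1 : Nat) : Int) := by push_cast; ring
      have hgb : PySem.List.pyGetD st ((s : Int) + 1) 0 = b := by
        rw [hcast, PySem.List.pyGetD_natCast]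
        simp [List.getD_eq_getElem?_getD, hb]
      rw [hga, hgb, hcast, ih (s + 1) ht' (acc ++ [(Int.gcd a b : Int)])]
      rw [show gcds (a :: b :: r) = (Int.gcd a b : Int) :: gcds (b :: r) from rfl]
      simp

lemma eq_sorted_iff_chain (g : List Int) :
    g = PySem.List.sorted g (fun x => x) false ↔ List.IsChain (· ≤ ·) g := by
  rw [List.isChain_iff_pairwise]
  constructor
  · intro h
    have hp := PySem.List.sorted_pairwise (xs := g) (key := fun x => x)
    rw [← h] at hp
    simpa using hp
  · intro h
    exact (PySem.List.sorted_eq_self_of_pairwise _ _ (by simpa using h)).symm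

lemma store_fold0 (i : Int) (l : List Int) :
    (PySem.List.pyRange 0 (l.length : Int) 1).foldl
        (fun acc j => if i ≠ j then acc ++ [PySem.List.pyGetD l j 0] else acc) []
      = storFrom i 0 l := by
  have h := store_fold i l l 0 rfl []
  simpa using h

lemma gcd_fold0 (st : List Int) :
    (PySem.List.pyRange 0 ((st.length : Int) - 1) 1).foldl
        (fun acc k =>
          acc ++ [(Int.gcd (PySem.List.pyGetD st k 0) (PySem.List.pyGetD st (k + 1) 0) : Int)]) []
      = gcds st := by
  have h := gcd_fold st st 0 rfl []
  simpa using h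

lemma check_eq (i : Int) (l : List Int) :
    check i l = if List.IsChain (· ≤ ·) (gcds (storFrom i 0 l)) then some true else none := by
  show (if _ = PySem.List.sorted _ (fun x => x) false then some true else none) = _
  rw [store_fold0 i l, gcd_fold0 (storFrom i 0 l)]
  by_cases h : List.IsChain (· ≤ ·) (gcds (storFrom i 0 l))
  · rw [if_pos ((eq_sorted_iff_chain _).mpr h), if_pos h]
  · rw [if_neg (fun hc => h ((eq_sorted_iff_chain _).mp hc)), if_neg h]

-- ===== VERDICT (by name: the statement is the Claim_ definition above) =====
theorem check_spec : Claim_equal_check := by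
  intro i l _
  unfold Spec_check
  rw [check_eq, check_alt_eq]
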